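-- pv_equiv track=rewrite | github.com/rennaMAhcuS/CodeWarsV4-NullCode | script_development.py | map_to_midpoint
-- ===== SOURCE A (Python) =====
-- def map_to_midpoint(n):
--     sequence = list(range(1, n + 1))
--     midpoint_index = (n - 1) // 2
--     result = [sequence[midpoint_index]]
--     for i in range(1, midpoint_index + 1):
--         if midpoint_index + i < n:
--             result.append(sequence[midpoint_index + i])
--         result.append(sequence[midpoint_index - i])
--     if n % 2 == 0:
--         result.append(sequence[-1])
--     return result
-- ===== SOURCE B (Python) =====
-- def map_to_midpoint(n):
--     nums = list(range(1, n + 1))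
--     c = nums[(n - 1) // 2]
--     return sorted(nums, key=lambda v: 2 * abs(v - c) + (v < c))
-- ===== Notes on version B (the rewrite author's own statement) =====
-- stated objective: idiomatic
-- what changed: Replaced the manual outward-interleaving index loop with building range(1, n+1) and one key-based sort: distance from the midpoint value, ties resolved by putting the higher value first.
-- outside the precondition, e.g. on map_to_midpoint(0): A raises IndexError, B raises IndexError
import Mathlib
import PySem

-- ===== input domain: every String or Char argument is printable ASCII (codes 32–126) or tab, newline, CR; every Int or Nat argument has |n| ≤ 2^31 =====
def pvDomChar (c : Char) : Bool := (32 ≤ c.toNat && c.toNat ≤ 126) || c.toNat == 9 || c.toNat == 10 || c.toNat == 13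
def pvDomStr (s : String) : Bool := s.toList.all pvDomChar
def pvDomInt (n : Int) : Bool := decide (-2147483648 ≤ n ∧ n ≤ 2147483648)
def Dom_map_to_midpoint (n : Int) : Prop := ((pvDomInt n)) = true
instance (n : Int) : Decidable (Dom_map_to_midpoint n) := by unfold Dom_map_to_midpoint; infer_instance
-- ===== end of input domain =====

-- B replaces A's manual outward-interleaving index loop with one key-based sort of
-- range(1, n+1): sort by distance from the midpoint value, higher value first on ties
-- (objective: idiomatic; not faster).

-- ===== PORT A =====
def map_to_midpoint (n : Int) : List Int :=
  let sequence := PySem.List.pyRange 1 (n + 1) 1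
  let midpointIndex := PySem.Int.floordiv (n - 1) 2
  match PySem.List.pyGet? sequence midpointIndex with
  | none => []   -- IndexError for n ≤ 0; excluded by Pre_
  | some mid =>
    let result :=
      (PySem.List.pyRange 1 (midpointIndex + 1) 1).foldl (fun acc i =>
        (if midpointIndex + i < n then
            acc ++ [PySem.List.pyGetD sequence (midpointIndex + i) 0]
          else acc)
          ++ [PySem.List.pyGetD sequence (midpointIndex - i) 0]) [mid]
    -- the loop's indices are in range whenever the midpoint lookup succeeded, so pyGetD is exact
    if PySem.Int.mod n 2 = 0 then result ++ [PySem.List.pyGetD sequence (-1) 0] else result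

-- ===== PORT B =====
def map_to_midpoint_alt (n : Int) : List Int :=
  let nums := PySem.List.pyRange 1 (n + 1) 1
  match PySem.List.pyGet? nums (PySem.Int.floordiv (n - 1) 2) with
  | none => []   -- IndexError for n ≤ 0; excluded by Pre_
  | some c =>
    PySem.List.sorted nums (fun v => 2 * |v - c| + (if v < c then 1 else 0)) false

-- ===== PRECONDITION & SPEC =====
-- Pre_ excludes exactly n ≤ 0, where A raises IndexError indexing the empty list (B raises there too).
def Pre_map_to_midpoint (n : Int) : Prop := 1 ≤ n
instance (n : Int) : Decidable (Pre_map_to_midpoint n) := by unfold Pre_map_to_midpoint; infer_instance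
def pvWitness_map_to_midpoint : Int := 5

def Spec_map_to_midpoint (n : Int) (out : List Int) : Prop := out = map_to_midpoint_alt n
instance (n : Int) (out : List Int) : Decidable (Spec_map_to_midpoint n out) := by unfold Spec_map_to_midpoint; infer_instance

-- ===== CLAIM (what is proved, stated in full; the proofs are below) =====
def Claim_equal_map_to_midpoint : Prop := ∀ (n : Int), Dom_map_to_midpoint n → Pre_map_to_midpoint n → Spec_map_to_midpoint n (map_to_midpoint n)

-- ===== LEMMAS AND PROOFS =====

lemma flat_perm (M : Nat) (c : Int) :
    ((PySem.List.pyRange 1 ((M : Int) + 1) 1).flatMap (fun i => [c + i, c - i])).Perm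
      (PySem.List.pyRange (c - M) c 1 ++ PySem.List.pyRange (c + 1) (c + 1 + M) 1) := by
  induction M with
  | zero => simp [PySem.List.pyRange_one_eq_nil]
  | succ M ih =>
    rw [show ((M + 1 : Nat) : Int) + 1 = ((M : Int) + 1) + 1 by push_cast; ring,
        PySem.List.pyRange_one_succ_right (by omega), List.flatMap_append]
    rw [show c - ((M+1 : Nat) : Int) = (c - ((M:Int)+1)) by push_cast; ring,
        PySem.List.pyRange_one_cons (by omega : c - ((M:Int)+1) < c),
        show c - ((M:Int)+1) + 1 = c - (M:Int) by ring,
        show c + 1 + ((M+1 : Nat) : Int) = (c + 1 + (M:Int)) + 1 by push_cast; ring,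
        PySem.List.pyRange_one_succ_right (by omega : c + 1 ≤ c + 1 + (M:Int))]
    refine (ih.append_right _).trans ?_
    refine List.perm_iff_count.2 (fun a => ?_)
    simp [List.count_append, List.count_cons, show c + ((M:Int)+1) = c + 1 + (M:Int) by ring]
    ring

lemma flat_keys (M : Nat) (c : Int) :
    ((PySem.List.pyRange 1 ((M : Int) + 1) 1).flatMap (fun i => [c + i, c - i])).map
        (fun v => 2 * |v - c| + (if v < c then 1 else 0))
      = PySem.List.pyRange 2 (2 * (M : Int) + 2) 1 := by
  induction M with
  | zero => simp [PySem.List.pyRange_one_eq_nil]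
  | succ M ih =>
    rw [show ((M + 1 : Nat) : Int) + 1 = ((M : Int) + 1) + 1 by push_cast; ring,
        PySem.List.pyRange_one_succ_right (by omega)]
    rw [List.flatMap_append, List.map_append, ih]
    rw [show 2 * ((M + 1 : Nat) : Int) + 2 = (2 * (M : Int) + 3) + 1 by push_cast; ring,
        PySem.List.pyRange_one_succ_right (by omega),
        show (2 * (M : Int) + 3) = (2 * (M : Int) + 2) + 1 by ring,
        PySem.List.pyRange_one_succ_right (by omega)]
    have h1 : ¬ (c + ((M : Int) + 1) < c) := by omega
    have h2 : c - ((M : Int) + 1) < c := by omega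
    simp only [List.flatMap_cons, List.flatMap_nil, List.map_cons, List.map_nil, List.append_nil,
      List.append_assoc, List.cons_append, List.nil_append]
    congr 1
    rw [if_neg h1, if_pos h2, abs_of_nonneg (by omega : (0:Int) ≤ c + ((M:Int)+1) - c),
        abs_of_nonpos (by omega : c - ((M:Int)+1) - c ≤ 0)]
    ring_nf

lemma zero_cons_range_pairwise (K : Int) :
    List.Pairwise (fun a b : Int => a < b) ((0:Int) :: PySem.List.pyRange 2 K 1) := by
  refine List.pairwise_cons.2 ⟨fun x hx => ?_, PySem.List.pairwise_lt_pyRange_one 2 K⟩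
  have := PySem.List.mem_pyRange_one.1 hx
  omega

lemma key_center (c : Int) : (2 * |c - c| + (if c < c then 1 else 0) : Int) = 0 := by simp

lemma sorted_odd (M : Nat) :
    PySem.List.sorted (PySem.List.pyRange 1 (2*(M:Int)+2) 1)
        (fun v => 2 * |v - ((M:Int)+1)| + (if v < ((M:Int)+1) then 1 else 0)) false
      = ((M:Int)+1) ::
          (PySem.List.pyRange 1 ((M:Int)+1) 1).flatMap (fun i => [((M:Int)+1)+i, ((M:Int)+1)-i]) := by
  have h1 := flat_perm M ((M:Int)+1)
  rw [show ((M:Int)+1) - (M:Int) = 1 by ring,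
      show ((M:Int)+1) + 1 + (M:Int) = 2*(M:Int)+2 by ring] at h1
  refine PySem.List.sorted_eq_of_perm_of_pairwise_lt _ _ _ ?_ ?_
  · conv_rhs => rw [PySem.List.pyRange_one_append 1 ((M:Int)+1) (2*(M:Int)+2) (by omega) (by omega),
      PySem.List.pyRange_one_cons (show ((M:Int)+1) < 2*(M:Int)+2 by omega)]
    exact (h1.cons _).trans List.perm_middle.symm
  · refine List.pairwise_map.1 ?_
    simp only [List.map_cons, flat_keys M ((M:Int)+1), key_center]
    exact zero_cons_range_pairwise _

lemma sorted_even (M : Nat) :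
    PySem.List.sorted (PySem.List.pyRange 1 (2*(M:Int)+3) 1)
        (fun v => 2 * |v - ((M:Int)+1)| + (if v < ((M:Int)+1) then 1 else 0)) false
      = ((M:Int)+1) ::
          ((PySem.List.pyRange 1 ((M:Int)+1) 1).flatMap (fun i => [((M:Int)+1)+i, ((M:Int)+1)-i])
            ++ [2*(M:Int)+2]) := by
  have h1 := flat_perm M ((M:Int)+1)
  rw [show ((M:Int)+1) - (M:Int) = 1 by ring,
      show ((M:Int)+1) + 1 + (M:Int) = 2*(M:Int)+2 by ring] at h1
  have h2 : ((PySem.List.pyRange 1 ((M:Int)+1) 1).flatMap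
        (fun i => [((M:Int)+1)+i, ((M:Int)+1)-i]) ++ [2*(M:Int)+2]).Perm
      (PySem.List.pyRange 1 ((M:Int)+1) 1
        ++ (PySem.List.pyRange ((M:Int)+2) (2*(M:Int)+2) 1 ++ [2*(M:Int)+2])) := by
    rw [← List.append_assoc]
    exact h1.append_right _
  refine PySem.List.sorted_eq_of_perm_of_pairwise_lt _ _ _ ?_ ?_
  · conv_rhs => rw [PySem.List.pyRange_one_append 1 ((M:Int)+1) (2*(M:Int)+3) (by omega) (by omega),
      PySem.List.pyRange_one_cons (show ((M:Int)+1) < 2*(M:Int)+3 by omega),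
      show (2*(M:Int)+3) = (2*(M:Int)+2) + 1 by ring,
      PySem.List.pyRange_one_succ_right (show ((M:Int)+1)+1 ≤ 2*(M:Int)+2 by omega)]
    exact (h2.cons _).trans List.perm_middle.symm
  · refine List.pairwise_map.1 ?_
    simp only [List.map_cons, List.map_append, flat_keys M ((M:Int)+1), key_center, List.map_nil]
    have hk : (2 * |2*(M:Int)+2 - ((M:Int)+1)| + (if 2*(M:Int)+2 < ((M:Int)+1) then 1 else 0) : Int)
        = 2*(M:Int)+2 := by
      rw [if_neg (by omega), abs_of_nonneg (by omega)]; ring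
    rw [hk, show PySem.List.pyRange 2 (2*(M:Int)+2) 1 ++ [2*(M:Int)+2]
          = PySem.List.pyRange 2 (2*(M:Int)+3) 1 by
        rw [show (2*(M:Int)+3) = (2*(M:Int)+2) + 1 by ring,
            PySem.List.pyRange_one_succ_right (by omega)]]
    exact zero_cons_range_pairwise _

lemma last_range (n : Int) (hn : 1 ≤ n) :
    PySem.List.pyGetD (PySem.List.pyRange 1 (n+1) 1) (-1) 0 = n := by
  rw [show (-1 : Int) = -((1:Nat):Int) by norm_num,
      PySem.List.pyGetD_neg_natCast _ 1 0 (by norm_num)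
        (by rw [PySem.List.length_pyRange_one]; omega),
      PySem.List.getElem_pyRange_one, PySem.List.length_pyRange_one]
  omega


-- ===== VERDICT (by name: the statement is the Claim_ definition above) =====
theorem map_to_midpoint_spec : Claim_equal_map_to_midpoint := by
  intro n _ hn
  replace hn : 1 ≤ n := hn
  unfold Spec_map_to_midpoint map_to_midpoint map_to_midpoint_alt
  have hdm := PySem.Int.floordiv_mul_add_mod (n-1) 2
  have hr0 := PySem.Int.mod_nonneg (n-1) (by norm_num : (0:Int) < 2)
  have hr1 := PySem.Int.mod_lt (n-1) (by norm_num : (0:Int) < 2)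
  obtain ⟨M, hM⟩ : ∃ M : Nat, PySem.Int.floordiv (n - 1) 2 = (M : Int) :=
    ⟨(PySem.Int.floordiv (n - 1) 2).toNat, (Int.toNat_of_nonneg (by omega)).symm⟩
  rw [hM] at hdm
  have hget : PySem.List.pyGet? (PySem.List.pyRange 1 (n + 1) 1) ((M:Int)) = some ((M:Int) + 1) := by
    rw [PySem.List.pyGet?_of_nonneg _ (by omega), PySem.List.getElem?_pyRange_one,
        if_pos (by omega : ((M:Int)).toNat < (n + 1 - 1).toNat)]
    congr 1
    omega
  simp only [hM, hget]
  have hbody : ∀ (acc : List Int), ∀ i ∈ PySem.List.pyRange 1 ((M:Int) + 1) 1,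
      ((if (M:Int) + i < n then
          acc ++ [PySem.List.pyGetD (PySem.List.pyRange 1 (n + 1) 1) ((M:Int) + i) 0]
        else acc)
        ++ [PySem.List.pyGetD (PySem.List.pyRange 1 (n + 1) 1) ((M:Int) - i) 0])
      = acc ++ [((M:Int)+1) + i, ((M:Int)+1) - i] := by
    intro acc i hi
    obtain ⟨hi1, hi2⟩ := PySem.List.mem_pyRange_one.1 hi
    rw [if_pos (by omega : (M:Int) + i < n),
        PySem.List.pyGetD_eq_getElem _ 0 (by omega) (by rw [PySem.List.length_pyRange_one]; omega),
        PySem.List.pyGetD_eq_getElem _ 0 (by omega) (by rw [PySem.List.length_pyRange_one]; omega),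
        PySem.List.getElem_pyRange_one, PySem.List.getElem_pyRange_one, List.append_assoc]
    have e1 : 1 + (((M:Int) + i).toNat : Int) = ((M:Int)+1) + i := by omega
    have e2 : 1 + (((M:Int) - i).toNat : Int) = ((M:Int)+1) - i := by omega
    rw [e1, e2]
    rfl
  rw [PySem.List.foldl_congr_mem _ _ _ _ hbody,
      PySem.List.foldl_append_eq_flatMap (fun i => [((M:Int)+1) + i, ((M:Int)+1) - i])]
  by_cases hpar : PySem.Int.mod n 2 = 0
  · have hne : n = 2*(M:Int) + 2 := by
      rcases (PySem.Int.mod_eq_zero_iff_dvd n 2).1 hpar with ⟨k, hk⟩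
      omega
    subst hne
    rw [if_pos hpar, last_range _ (by omega),
        show (2*(M:Int)+2) + 1 = 2*(M:Int)+3 by ring, sorted_even M]
    simp
  · have hno : n = 2*(M:Int) + 1 := by
      have h2 : ¬ (2 ∣ n) := fun h => hpar ((PySem.Int.mod_eq_zero_iff_dvd n 2).2 h)
      omega
    subst hno
    rw [if_neg hpar, show (2*(M:Int)+1) + 1 = 2*(M:Int)+2 by ring, sorted_odd M]
    simp
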